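-- pv_equiv track=rewrite | github.com/HanH9/Ehanced_ACO_API | solver.py | _split_route
-- ===== SOURCE A (Python) =====
-- def _split_route(route: list[int]) -> list[list[int]]:
--     result = []
--
--     path = [route[0]]
--     for value in route[1:]:
--         path.append(value)
--         if value == 0:
--             result.append(path)
--             path = [0]
--     return result
-- ===== SOURCE B (Python) =====
-- def _split_route(route: list[int]) -> list[list[int]]:
--     zeros = [i for i, v in enumerate(route) if v == 0 and i > 0]
--     result = []
--     start = 0
--     for z in zeros:
--         result.append(route[start:z + 1])
--         start = z
--     return result
-- ===== Notes on version B (the rewrite author's own statement) =====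
-- stated objective: alternative
-- what changed: B first collects the positive indices of zeros via enumerate and then builds each subroute as a slice route[start:z+1] between consecutive zeros, instead of A's element-by-element accumulation of a growing path list.
import Mathlib
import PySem

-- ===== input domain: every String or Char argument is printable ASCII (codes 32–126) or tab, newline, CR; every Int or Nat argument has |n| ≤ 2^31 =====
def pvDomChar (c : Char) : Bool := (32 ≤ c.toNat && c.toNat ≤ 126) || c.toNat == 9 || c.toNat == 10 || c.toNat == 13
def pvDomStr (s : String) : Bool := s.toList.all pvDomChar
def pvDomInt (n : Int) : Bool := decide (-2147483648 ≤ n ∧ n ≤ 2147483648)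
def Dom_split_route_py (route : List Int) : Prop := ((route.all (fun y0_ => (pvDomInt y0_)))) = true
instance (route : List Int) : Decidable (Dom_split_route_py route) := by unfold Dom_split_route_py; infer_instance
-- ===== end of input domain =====

-- B builds the subroutes as slices between the zero delimiters found by one enumerate pass,
-- instead of A's element-by-element path accumulation; same cost, different decomposition.

-- ===== PORT A =====
-- A's loop body (the `for value in route[1:]` step), named so the fold is readable
def pvStepA (s : List (List Int) × List Int) (value : Int) : List (List Int) × List Int :=
  let path := s.2 ++ [value]
  if value == 0 then (s.1 ++ [path], [0]) else (s.1, path)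

def split_route_py (route : List Int) : List (List Int) :=
  match PySem.List.pyGet? route 0 with   -- the first element; none = IndexError, excluded by Pre_
  | none => []
  | some h => ((PySem.List.slice route (some 1) none).foldl pvStepA ([], [h])).1

-- ===== PORT B =====
-- B's loop body (the `for z in zeros` step): append route[start:z+1], set start = z
def pvStepB (route : List Int) (s : List (List Int) × Int) (z : Int) :
    List (List Int) × Int :=
  (s.1 ++ [PySem.List.slice route (some s.2) (some (z + 1))], z)

def split_route_py_alt (route : List Int) : List (List Int) :=
  let zeros := ((PySem.List.enumerate route 0).filter
      (fun p => p.2 == 0 && decide (0 < p.1))).map (·.1)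
  (zeros.foldl (pvStepB route) ([], 0)).1

-- ===== PRECONDITION & SPEC =====
-- Pre_ excludes only the empty route, on which A raises IndexError reading its first element.
def Pre_split_route_py (route : List Int) : Prop := route ≠ []
instance (route : List Int) : Decidable (Pre_split_route_py route) := by
  unfold Pre_split_route_py; infer_instance

def pvWitness_split_route_py : List Int := [1, 0, 2, 0, 3]

def Spec_split_route_py (route : List Int) (out : List (List Int)) : Prop :=
  out = split_route_py_alt route
instance (route : List Int) (out : List (List Int)) : Decidable (Spec_split_route_py route out) := by
  unfold Spec_split_route_py; infer_instance

-- ===== CLAIM (what is proved, stated in full; the proofs are below) =====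
def Claim_equal_split_route_py : Prop :=
  ∀ (route : List Int), Dom_split_route_py route → Pre_split_route_py route →
    Spec_split_route_py route (split_route_py route)

-- ===== LEMMAS AND PROOFS =====

/-- The common recursive description of the split: `path` is the subroute built so far. -/
def pvCore : List Int → List Int → List (List Int)
  | _, [] => []
  | path, v :: rest =>
    if v = 0 then (path ++ [v]) :: pvCore [0] rest else pvCore (path ++ [v]) rest

theorem pvCore_zero (path rest : List Int) :
    pvCore path (0 :: rest) = (path ++ [0]) :: pvCore [0] rest := by
  simp [pvCore]

theorem pvCore_ne (path : List Int) (v : Int) (rest : List Int) (hv : v ≠ 0) :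
    pvCore path (v :: rest) = pvCore (path ++ [v]) rest := by
  simp [pvCore, hv]

theorem pvA_fold (rest : List Int) :
    ∀ (acc : List (List Int)) (path : List Int),
      (rest.foldl pvStepA (acc, path)).1 = acc ++ pvCore path rest := by
  induction rest with
  | nil => intro acc path; simp [pvCore]
  | cons v rest ih =>
    intro acc path
    rw [List.foldl_cons]
    by_cases hv : v = 0
    · subst hv
      have hst : pvStepA (acc, path) 0 = (acc ++ [path ++ [0]], [0]) := by simp [pvStepA]
      rw [hst, ih]
      simp [pvCore]
    · have hst : pvStepA (acc, path) v = (acc, path ++ [v]) := by simp [pvStepA, hv]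
      rw [hst, ih]
      simp [pvCore, hv]

theorem pvSlice_snoc (route : List Int) (s j : Nat) (v : Int) (rest : List Int)
    (hs : s ≤ j) (hd : route.drop j = v :: rest) :
    PySem.List.slice route (some ((s : Int))) (some (((j + 1 : Nat)) : Int))
      = PySem.List.slice route (some ((s : Int))) (some ((j : Int))) ++ [v] := by
  rw [PySem.List.slice_natCast, PySem.List.slice_natCast]
  have hjv : route[j]? = some v := by
    rw [← Nat.add_zero j, ← List.getElem?_drop, hd]; rfl
  have hjs : j + 1 - s = (j - s) + 1 := by omega
  rw [hjs, List.take_add_one]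
  have hget : (route.drop s)[j - s]? = some v := by
    rw [List.getElem?_drop, show s + (j - s) = j from by omega, hjv]
  simp [hget]

theorem pvSlice_single (route : List Int) (j : Nat) (v : Int) (rest : List Int)
    (hd : route.drop j = v :: rest) :
    PySem.List.slice route (some ((j : Int))) (some (((j + 1 : Nat)) : Int)) = [v] := by
  have h := pvSlice_snoc route j j v rest (le_refl j) hd
  rw [h, PySem.List.slice_natCast]
  simp

/-- Key invariant: folding B's slice step over the zero indices of the suffix `t`
(sitting at position `j ≥ 1` of `route`) extends `acc` by `pvCore path t`,
where `path = route[s:j]` is A's current path. -/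
theorem pvB_fold (route : List Int) (t : List Int) :
    ∀ (j s : Nat) (acc : List (List Int)),
      1 ≤ j → s ≤ j → route.drop j = t →
      ((((PySem.List.enumerate t ((j : Int))).filter
            (fun p => p.2 == 0 && decide (0 < p.1))).map (·.1)).foldl
          (pvStepB route) (acc, ((s : Int)))).1
        = acc ++ pvCore (PySem.List.slice route (some ((s : Int))) (some ((j : Int)))) t := by
  induction t with
  | nil => intro j s acc _ _ _; simp [PySem.List.enumerate, pvCore]
  | cons v rest ih =>
    intro j s acc hj hs hd
    have hd' : route.drop (j + 1) = rest := by
      have h2 : route.drop (j + 1) = (route.drop j).drop 1 := by rw [← List.drop_drop]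
      simp [h2, hd]
    have hcast : ((j : Int)) + 1 = (((j + 1 : Nat)) : Int) := by push_cast; ring
    have hjpos : (0 : Int) < ((j : Int)) := by exact_mod_cast hj
    rw [PySem.List.enumerate_cons, hcast]
    by_cases hv : v = 0
    · subst hv
      rw [List.filter_cons, if_pos (by simp; omega)]
      rw [List.map_cons, List.foldl_cons]
      have hst : pvStepB route (acc, ((s : Int))) ((j : Int))
          = (acc ++ [PySem.List.slice route (some ((s : Int))) (some (((j + 1 : Nat)) : Int))],
             ((j : Int))) := by
        simp only [pvStepB]
        rw [hcast]
      rw [hst]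
      rw [ih (j + 1) j _ (by omega) (by omega) hd']
      rw [pvSlice_snoc route s j 0 rest hs hd, pvSlice_single route j 0 rest hd]
      rw [pvCore_zero, List.append_assoc]
      rfl
    · rw [List.filter_cons, if_neg (by simp [hv])]
      rw [ih (j + 1) s acc (by omega) (by omega) hd']
      rw [pvSlice_snoc route s j v rest hs hd]
      rw [pvCore_ne _ _ _ hv]

-- ===== VERDICT (by name: the statement is the Claim_ definition above) =====
theorem split_route_py_spec : Claim_equal_split_route_py := by
  intro route _ hpre
  unfold Spec_split_route_py
  obtain ⟨h, t, rfl⟩ : ∃ h t, route = h :: t := by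
    cases route with
    | nil => exact absurd rfl hpre
    | cons h t => exact ⟨h, t, rfl⟩
  unfold split_route_py split_route_py_alt
  rw [PySem.List.pyGet?_zero_cons, PySem.List.slice_from_one]
  simp only [List.tail_cons]
  rw [pvA_fold]
  rw [PySem.List.enumerate_cons]
  rw [List.filter_cons, if_neg (by simp)]
  have key := pvB_fold (h :: t) t 1 0 [] (le_refl 1) (Nat.zero_le 1) (by simp)
  have hsl : PySem.List.slice (h :: t) (some (((0 : Nat)) : Int)) (some (((1 : Nat)) : Int))
      = [h] := by
    rw [PySem.List.slice_natCast]; simp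
  rw [hsl] at key
  simp only [Nat.cast_zero, Nat.cast_one] at key
  rw [show ((0:Int) + 1) = 1 from by norm_num]
  rw [key]
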